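-- pv_equiv track=rewrite | github.com/SenuriWijenayake/PythonServer | locationClassifier.py | regression_function
-- ===== SOURCE A (Python) =====
-- types = ['aquarium','airport','point_of_interest','establishment','amusement_park','aquarium','art_gallery','lodging','bar','food',
--          'restaurant','cafe','shopping_mall','place_of_worship','church','health','spa','bowling_alley','casino','park', 'hindu_temple',
--          'mosque','library','liquor_store','movie_theater','museum','night_club','stadium','zoo']
--
-- def regression_function(train,label):
--     result={}
--     for t in types:
--         if(t in train):
--             value = 1
--         else:
--             value = 0
--         result[t] = value
--     return(result,label)
-- ===== SOURCE B (Python) =====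
-- types = ['aquarium','airport','point_of_interest','establishment','amusement_park','aquarium','art_gallery','lodging','bar','food',
--          'restaurant','cafe','shopping_mall','place_of_worship','church','health','spa','bowling_alley','casino','park', 'hindu_temple',
--          'mosque','library','liquor_store','movie_theater','museum','night_club','stadium','zoo']
--
-- def regression_function(train, label):
--     result = dict.fromkeys(types, 0)
--     for x in train:
--         if x in result:
--             result[x] = 1
--     return (result, label)
-- ===== Notes on version B (the rewrite author's own statement) =====
-- stated objective: faster
-- what changed: B pre-builds the dict with all type keys at 0 via dict.fromkeys and then makes one pass over train flipping present keys to 1 with an O(1) hash-dict membership test, instead of A's loop over the type list doing a linear `t in train` scan for each type.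
import Mathlib
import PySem

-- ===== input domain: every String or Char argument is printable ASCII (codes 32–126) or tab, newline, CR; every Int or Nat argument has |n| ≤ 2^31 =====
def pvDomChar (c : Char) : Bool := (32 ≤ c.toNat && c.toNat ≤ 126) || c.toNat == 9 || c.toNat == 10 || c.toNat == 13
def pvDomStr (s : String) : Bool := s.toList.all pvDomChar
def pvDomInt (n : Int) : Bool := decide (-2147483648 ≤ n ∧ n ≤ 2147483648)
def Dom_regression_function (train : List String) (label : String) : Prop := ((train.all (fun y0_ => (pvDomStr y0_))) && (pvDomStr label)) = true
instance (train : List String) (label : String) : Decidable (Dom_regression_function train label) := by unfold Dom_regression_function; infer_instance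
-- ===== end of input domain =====

-- B pre-builds the dict with all type keys at 0 (dict.fromkeys) and then makes one pass over
-- `train` flipping present keys to 1, testing membership against the dict itself; A instead loops
-- over the fixed type list testing `t in train` per type (alternative decomposition, equal value).

-- the module-level `types` list (shared context of A and B, exactly as in the Python source)
def pyTypes : List String :=
  ["aquarium","airport","point_of_interest","establishment","amusement_park","aquarium","art_gallery","lodging","bar","food",
   "restaurant","cafe","shopping_mall","place_of_worship","church","health","spa","bowling_alley","casino","park","hindu_temple",
   "mosque","library","liquor_store","movie_theater","museum","night_club","stadium","zoo"]

-- ===== PORT A =====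
-- for t in types: result[t] = 1 if t in train else 0
def regression_function (train : List String) (label : String) : (List (String × Int)) × String :=
  ((pyTypes.foldl (fun r t => r.insert t (if train.contains t then (1 : Int) else 0))
      PySem.Dict.empty).items, label)

-- ===== PORT B =====
-- result = dict.fromkeys(types, 0)   (keys inserted left to right, value 0)
def bFromKeys : List String → PySem.Dict String Int → PySem.Dict String Int
  | [], d => d
  | t :: ts, d => bFromKeys ts (d.insert t 0)

-- for x in train: if x in result: result[x] = 1
def bMark : List String → PySem.Dict String Int → PySem.Dict String Int
  | [], d => d
  | x :: xs, d => bMark xs (if d.contains x then d.insert x 1 else d)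

def regression_function_alt (train : List String) (label : String) : (List (String × Int)) × String :=
  ((bMark train (bFromKeys pyTypes PySem.Dict.empty)).items, label)

-- ===== PRECONDITION & SPEC =====
def Spec_regression_function (train : List String) (label : String) (out : (List (String × Int)) × String) : Prop := out = regression_function_alt train label
instance (train : List String) (label : String) (out : (List (String × Int)) × String) : Decidable (Spec_regression_function train label out) := by unfold Spec_regression_function; infer_instance

-- ===== CLAIM (what is proved, stated in full; the proofs are below) =====
def Claim_equal_regression_function : Prop := ∀ (train : List String) (label : String), Dom_regression_function train label → Spec_regression_function train label (regression_function train label)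

-- ===== LEMMAS AND PROOFS =====

-- lookup after a fold of inserts whose value depends only on the key
theorem getD_foldl_insert_fn (l : List String) (v : String → Int)
    (d : PySem.Dict String Int) (k : String) (d0 : Int) :
    (l.foldl (fun r t => r.insert t (v t)) d).getD k d0 =
      if k ∈ l then v k else d.getD k d0 := by
  induction l generalizing d with
  | nil => simp
  | cons x xs ih =>
      simp only [List.foldl_cons, ih, PySem.Dict.getD_insert, List.mem_cons]
      by_cases hx : k = x <;> by_cases hmem : k ∈ xs <;> simp [hx, hmem]

-- keys of a fold of inserts from the empty dict
theorem keys_foldl_insert_fn (l : List String) (v : String → Int) :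
    (l.foldl (fun r t => r.insert t (v t)) PySem.Dict.empty).keys = PySem.Set.ofList l := by
  have := PySem.Dict.keys_foldl_insert l (fun (_ : PySem.Dict String Int) t => v t)
      PySem.Dict.empty
  simpa [PySem.Dict.keys_empty, PySem.Set.ofList] using this

-- bFromKeys is the left fold of inserts with value 0
theorem bFromKeys_eq_foldl (l : List String) (d : PySem.Dict String Int) :
    bFromKeys l d = l.foldl (fun r t => r.insert t (0 : Int)) d := by
  induction l generalizing d with
  | nil => rfl
  | cons x xs ih => simp [bFromKeys, ih]

-- B's marking pass never adds or removes a key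
theorem keys_bMark (xs : List String) (d : PySem.Dict String Int) :
    (bMark xs d).keys = d.keys := by
  induction xs generalizing d with
  | nil => rfl
  | cons x l ih =>
      simp only [bMark]
      by_cases hc : d.contains x
      · rw [if_pos hc, ih]
        exact PySem.Dict.keys_insert_of_contains d 1 hc
      · rw [if_neg hc, ih]

-- lookup after B's marking pass
theorem getD_bMark (xs : List String) (d : PySem.Dict String Int) (k : String) :
    (bMark xs d).getD k 0 =
      if k ∈ xs ∧ d.contains k = true then 1 else d.getD k 0 := by
  induction xs generalizing d with
  | nil => simp [bMark]
  | cons x l ih =>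
      simp only [bMark, List.mem_cons]
      by_cases hc : d.contains x
      · rw [if_pos hc, ih]
        by_cases hk : k = x
        · subst hk
          simp [hc]
        · have : ((d.insert x (1 : Int)).contains k) = d.contains k := by
            rw [PySem.Dict.contains_insert]; simp [hk]
          rw [this, PySem.Dict.getD_insert, if_neg hk]
          by_cases hm : k ∈ l <;> simp [hm, hk]
      · rw [if_neg hc, ih]
        by_cases hk : k = x
        · subst hk; simp [hc]
        · simp [hk]

-- the two item lists agree for every train
theorem items_agree (train : List String) :
    (pyTypes.foldl (fun r t => r.insert t (if train.contains t then (1 : Int) else 0))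
        PySem.Dict.empty).items =
    (bMark train (bFromKeys pyTypes PySem.Dict.empty)).items := by
  have hinit : bFromKeys pyTypes PySem.Dict.empty =
      pyTypes.foldl (fun r t => r.insert t (0 : Int)) PySem.Dict.empty :=
    bFromKeys_eq_foldl _ _
  have hkA := keys_foldl_insert_fn pyTypes (fun t => if train.contains t then (1 : Int) else 0)
  have hkInit : (bFromKeys pyTypes PySem.Dict.empty).keys = PySem.Set.ofList pyTypes := by
    rw [hinit]; exact keys_foldl_insert_fn pyTypes (fun _ => (0 : Int))
  have hndA : (pyTypes.foldl (fun r t => r.insert t (if train.contains t then (1 : Int) else 0))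
      PySem.Dict.empty).keys.Nodup := by rw [hkA]; exact PySem.Set.nodup_ofList _
  have hkB : (bMark train (bFromKeys pyTypes PySem.Dict.empty)).keys =
      PySem.Set.ofList pyTypes := by rw [keys_bMark, hkInit]
  have hndB : (bMark train (bFromKeys pyTypes PySem.Dict.empty)).keys.Nodup := by
    rw [hkB]; exact PySem.Set.nodup_ofList _
  rw [PySem.Dict.items_eq_map_keys _ hndA 0, PySem.Dict.items_eq_map_keys _ hndB 0, hkA, hkB]
  apply List.map_congr_left
  intro t ht
  have htypes : t ∈ pyTypes := (PySem.Set.mem_ofList _ _).mp ht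
  have hcont : (bFromKeys pyTypes PySem.Dict.empty).contains t = true := by
    rw [PySem.Dict.contains_eq_decide_mem_keys, hkInit]
    simp [PySem.Set.mem_ofList, htypes]
  rw [getD_foldl_insert_fn, getD_bMark, hcont, hinit, getD_foldl_insert_fn]
  simp only [htypes, if_true, and_true]
  by_cases hm : t ∈ train
  · simp
  · have : train.contains t = false := by
      simp [hm]
    rw [this]
    simp [hm]

-- ===== VERDICT (by name: the statement is the Claim_ definition above) =====
theorem regression_function_spec : Claim_equal_regression_function := by
  intro train label _
  show (_, label) = (_, label)
  exact congrArg (fun l => (l, label)) (items_agree train)
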